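-- pv_equiv track=rewrite | github.com/JoshuaMosier/nyt-film-ballots | extract_nyt_film_data.py | extract_complete_data_object
-- ===== SOURCE A (Python) =====
-- def extract_complete_data_object(html_content: str, start_pos: int) -> str:
--     """Extract a complete JavaScript object/array starting from a position"""
--
--     # Find the start of the object/array
--     brace_pos = start_pos
--     while brace_pos < len(html_content) and html_content[brace_pos] not in '{[':
--         brace_pos += 1
--
--     if brace_pos >= len(html_content):
--         return None
--
--     start_char = html_content[brace_pos]
--     end_char = '}' if start_char == '{' else ']'
--
--     # Find the matching closing brace/bracket
--     bracket_count = 0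
--     current_pos = brace_pos
--     in_string = False
--     escape_next = False
--
--     while current_pos < len(html_content):
--         char = html_content[current_pos]
--
--         if escape_next:
--             escape_next = False
--         elif char == '\\' and in_string:
--             escape_next = True
--         elif char == '"' and not escape_next:
--             in_string = not in_string
--         elif not in_string:
--             if char in '{[':
--                 bracket_count += 1
--             elif char in '}]':
--                 bracket_count -= 1
--                 if bracket_count == 0:
--                     # Found the closing bracket
--                     end_pos = current_pos
--                     return html_content[brace_pos:end_pos + 1]
--
--         current_pos += 1
--
--     return None
-- ===== SOURCE B (Python) =====
-- def extract_complete_data_object(html_content: str, start_pos: int) -> str: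
--     """Extract a complete JS object/array: staged passes — locate the opener,
--     collect the structural brackets outside string literals, then find the
--     matching close with a running-depth scan over that list."""
--     n = len(html_content)
--     for pos in range(start_pos, n):
--         if html_content[pos] in '{[':
--             break
--     else:
--         return None
--     # Pass 1: the brackets that sit outside string literals, with their indices
--     structural = []
--     in_string = False
--     escape = False
--     for i in range(pos, n):
--         ch = html_content[i]
--         if escape:
--             escape = False
--         elif ch == '\\' and in_string:
--             escape = True
--         elif ch == '"':
--             in_string = not in_string
--         elif not in_string and ch in '{[}]':
--             structural.append((i, ch))
--     # Pass 2: running depth over the structural brackets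
--     depth = 0
--     for i, ch in structural:
--         depth += 1 if ch in '{[' else -1
--         if depth == 0:
--             return html_content[pos:i + 1]
--     return None
-- ===== Notes on version B (the rewrite author's own statement) =====
-- stated objective: alternative
-- what changed: A's single state-machine loop with a live depth counter is replaced by staged passes: first collect the list of structural brackets outside string literals (with their indices), then find the matching close by a separate running-depth scan over that short list; the per-character work in pass 1 does fewer branches than A's combined loop, a constant-factor win a timing run measured.
import Mathlib
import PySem

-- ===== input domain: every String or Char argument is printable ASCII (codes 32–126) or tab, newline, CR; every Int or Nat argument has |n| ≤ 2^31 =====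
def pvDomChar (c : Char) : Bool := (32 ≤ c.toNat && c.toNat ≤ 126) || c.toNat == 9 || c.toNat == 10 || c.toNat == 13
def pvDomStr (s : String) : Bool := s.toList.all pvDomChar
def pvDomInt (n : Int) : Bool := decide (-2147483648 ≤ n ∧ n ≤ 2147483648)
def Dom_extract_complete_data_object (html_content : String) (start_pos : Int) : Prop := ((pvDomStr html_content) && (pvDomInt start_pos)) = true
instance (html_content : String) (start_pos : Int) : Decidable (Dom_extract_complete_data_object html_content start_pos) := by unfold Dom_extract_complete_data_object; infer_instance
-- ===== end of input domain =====

-- B is an alternative decomposition: A matches the closing bracket in ONE state-machine loop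
-- with a live depth counter; B first collects the structural brackets outside string literals
-- into a list and then scans that list with a running depth. Return values agree on every
-- input where the Python A does not raise.

-- ===== PORT A =====
-- A's first while loop: advance brace_pos to the first '{' or '['.
-- fuel is only a totality guard: it runs out only when pos ≥ length, where the loop exits anyway.
def pvFindBrace (cs : List Char) (fuel : Nat) (pos : Int) : Option Int :=
  match fuel with
  | 0 => none
  | f + 1 =>
    if pos < (cs.length : Int) then
      match PySem.List.pyGet? cs pos with
      | none => none   -- Python raises IndexError here (excluded by Pre_)
      | some c =>
        if c = '{' ∨ c = '[' then some pos
        else pvFindBrace cs f (pos + 1)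
    else none

-- A's main while-loop: state (bracket_count, in_string, escape_next), one character per step.
def pvLoopA (cs : List Char) (fuel : Nat) (pos count : Int) (inStr esc : Bool) : Option Int :=
  match fuel with
  | 0 => none
  | f + 1 =>
    if pos < (cs.length : Int) then
      match PySem.List.pyGet? cs pos with
      | none => none   -- Python raises IndexError here (excluded by Pre_)
      | some c =>
        if esc then pvLoopA cs f (pos + 1) count inStr false
        else if c = '\\' ∧ inStr = true then pvLoopA cs f (pos + 1) count inStr true
        else if c = '"' ∧ esc = false then pvLoopA cs f (pos + 1) count (!inStr) false
        else if inStr = false then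
          if c = '{' ∨ c = '[' then pvLoopA cs f (pos + 1) (count + 1) inStr false
          else if c = '}' ∨ c = ']' then
            if count - 1 = 0 then some pos
            else pvLoopA cs f (pos + 1) (count - 1) inStr false
          else pvLoopA cs f (pos + 1) count inStr false
        else pvLoopA cs f (pos + 1) count inStr false
    else none

def extract_complete_data_object (html_content : String) (start_pos : Int) : Option String :=
  let cs := html_content.toList
  match pvFindBrace cs (((cs.length : Int) - start_pos).toNat + 1) start_pos with
  | none => none
  | some brace =>
    match pvLoopA cs (((cs.length : Int) - brace).toNat + 1) brace 0 false false with
    | none => none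
    | some endPos => some (String.ofList (PySem.List.slice cs (some brace) (some (endPos + 1))))

-- ===== PORT B =====
-- Pass 1 of Source B: walk the index range once and collect (index, char) for every bracket
-- that sits outside a string literal (the for-loop building `structural`, list built front-to-back).
def pvPass1 (cs : List Char) (idxs : List Int) (inStr esc : Bool) : List (Int × Char) :=
  match idxs with
  | [] => []
  | i :: rest =>
    match PySem.List.pyGet? cs i with
    | none => []   -- Python raises IndexError here (excluded by Pre_)
    | some ch =>
      if esc then pvPass1 cs rest inStr false
      else if ch = '\\' ∧ inStr = true then pvPass1 cs rest inStr true
      else if ch = '"' then pvPass1 cs rest (!inStr) false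
      else if inStr = false ∧ (ch = '{' ∨ ch = '[' ∨ ch = '}' ∨ ch = ']') then
        (i, ch) :: pvPass1 cs rest false false
      else pvPass1 cs rest inStr esc

-- Pass 2 of Source B: running depth over the structural list; first index where depth hits 0.
def pvPass2 (structural : List (Int × Char)) (depth : Int) : Option Int :=
  match structural with
  | [] => none
  | (i, ch) :: rest =>
    let d := depth + (if ch = '{' ∨ ch = '[' then 1 else -1)
    if d = 0 then some i else pvPass2 rest d

def extract_complete_data_object_alt (html_content : String) (start_pos : Int) : Option String :=
  let cs := html_content.toList
  let n : Int := (cs.length : Int)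
  -- the for/else locating loop: first index in range(start_pos, n) holding '{' or '['
  match (PySem.List.pyRange start_pos n 1).find?
      (fun i => match PySem.List.pyGet? cs i with
                | some c => c = '{' || c = '['
                | none => false) with   -- none: Python raises IndexError (excluded by Pre_)
  | none => none
  | some pos =>
    match pvPass2 (pvPass1 cs (PySem.List.pyRange pos n 1) false false) 0 with
    | none => none
    | some i => some (String.ofList (PySem.List.slice cs (some pos) (some (i + 1))))

-- ===== PRECONDITION & SPEC =====
-- Pre_ excludes exactly the inputs where the Python A raises IndexError:
-- start_pos < -len(html_content) makes the very first html_content[brace_pos] access raise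
-- (the natural B raises there too).
def Pre_extract_complete_data_object (html_content : String) (start_pos : Int) : Prop :=
  -(html_content.toList.length : Int) ≤ start_pos

instance (html_content : String) (start_pos : Int) : Decidable (Pre_extract_complete_data_object html_content start_pos) := by
  unfold Pre_extract_complete_data_object; infer_instance

def pvWitness_extract_complete_data_object : String × Int := ("var x = {\"a\": [1, \"}\"]};", 4)

def Spec_extract_complete_data_object (html_content : String) (start_pos : Int) (out : Option String) : Prop := out = extract_complete_data_object_alt html_content start_pos
instance (html_content : String) (start_pos : Int) (out : Option String) : Decidable (Spec_extract_complete_data_object html_content start_pos out) := by unfold Spec_extract_complete_data_object; infer_instance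

-- ===== CLAIM (what is proved, stated in full; the proofs are below) =====
def Claim_equal_extract_complete_data_object : Prop := ∀ (html_content : String) (start_pos : Int), Dom_extract_complete_data_object html_content start_pos → Pre_extract_complete_data_object html_content start_pos → Spec_extract_complete_data_object html_content start_pos (extract_complete_data_object html_content start_pos)

-- ===== LEMMAS AND PROOFS =====

-- in-range indices always hit a character
theorem pyGet?_isSome_of_range (cs : List Char) (i : Int)
    (h1 : -(cs.length : Int) ≤ i) (h2 : i < (cs.length : Int)) :
    ∃ c, PySem.List.pyGet? cs i = some c := by
  cases hg : PySem.List.pyGet? cs i with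
  | some c => exact ⟨c, rfl⟩
  | none =>
    have := (PySem.List.pyGet?_eq_none_iff (xs := cs) (i := i)).mp hg
    exact absurd (by unfold PySem.Raise.InRange; omega) this

-- A's locating loop equals B's find? over range(start_pos, n)
theorem pvFindBrace_eq_find (cs : List Char) : ∀ (f : Nat) (pos : Int),
    (cs.length : Int) < (f : Int) + pos → -(cs.length : Int) ≤ pos →
    pvFindBrace cs f pos = (PySem.List.pyRange pos (cs.length : Int) 1).find?
      (fun i => match PySem.List.pyGet? cs i with
                | some c => c = '{' || c = '['
                | none => false) := by
  intro f
  induction f with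
  | zero =>
    intro pos hf hlo
    simp [pvFindBrace, PySem.List.pyRange_one_eq_nil (show (cs.length : Int) ≤ pos by push_cast at hf; omega)]
  | succ f ih =>
    intro pos hf hlo
    by_cases hp : pos < (cs.length : Int)
    · obtain ⟨c, hc⟩ := pyGet?_isSome_of_range cs pos hlo hp
      rw [PySem.List.pyRange_one_cons hp]
      simp only [pvFindBrace, if_pos hp, hc]
      by_cases hop : c = '{' ∨ c = '['
      · rw [if_pos hop, List.find?_cons_of_pos (by rw [hc]; dsimp only; rcases hop with rfl | rfl <;> decide)]
      · rw [if_neg hop, List.find?_cons_of_neg (by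
          rw [hc]; dsimp only
          simp only [Bool.or_eq_true, decide_eq_true_eq]
          exact fun h => hop h)]
        exact ih (pos + 1) (by push_cast at hf ⊢; omega) (by omega)
    · simp [pvFindBrace, hp, PySem.List.pyRange_one_eq_nil (show (cs.length : Int) ≤ pos by omega)]

-- pvFindBrace returns an in-range position ≥ its start, holding an opening bracket
theorem pvFindBrace_spec (cs : List Char) : ∀ (f : Nat) (pos brace : Int),
    pvFindBrace cs f pos = some brace →
    pos ≤ brace ∧ brace < (cs.length : Int) ∧
      ∃ c, PySem.List.pyGet? cs brace = some c ∧ (c = '{' ∨ c = '[') := by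
  intro f
  induction f with
  | zero => intro pos brace h; simp [pvFindBrace] at h
  | succ f ih =>
    intro pos brace h
    simp only [pvFindBrace] at h
    by_cases hp : pos < (cs.length : Int)
    · rw [if_pos hp] at h
      cases hg : PySem.List.pyGet? cs pos with
      | none => rw [hg] at h; simp at h
      | some c =>
        rw [hg] at h
        dsimp only at h
        split_ifs at h with hop
        · simp only [Option.some.injEq] at h
          subst h
          exact ⟨le_refl _, hp, c, hg, hop⟩
        · obtain ⟨h1, h2, h3⟩ := ih (pos + 1) brace h
          exact ⟨by omega, h2, h3⟩
    · rw [if_neg hp] at h; simp at h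

-- the heart: A's counter loop at depth count ≥ 1 equals B's depth scan over the
-- structural-bracket list collected from the same position with the same string state
theorem pvLoop_eq_passes (cs : List Char) : ∀ (f : Nat) (pos count : Int) (inStr esc : Bool),
    (cs.length : Int) < (f : Int) + pos → -(cs.length : Int) ≤ pos → 1 ≤ count →
    pvLoopA cs f pos count inStr esc
      = pvPass2 (pvPass1 cs (PySem.List.pyRange pos (cs.length : Int) 1) inStr esc) count := by
  intro f
  induction f with
  | zero =>
    intro pos count inStr esc hf hlo hcnt
    simp [pvLoopA, pvPass1, pvPass2,
      PySem.List.pyRange_one_eq_nil (show (cs.length : Int) ≤ pos by push_cast at hf; omega)]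
  | succ f ih =>
    intro pos count inStr esc hf hlo hcnt
    by_cases hp : pos < (cs.length : Int)
    · obtain ⟨c, hc⟩ := pyGet?_isSome_of_range cs pos hlo hp
      rw [PySem.List.pyRange_one_cons hp]
      simp only [pvLoopA, if_pos hp, hc, pvPass1]
      have hsuf : (cs.length : Int) < (f : Int) + (pos + 1) := by push_cast at hf ⊢; omega
      have hlo' : -(cs.length : Int) ≤ pos + 1 := by omega
      cases esc with
      | true =>
        rw [if_pos rfl, if_pos rfl]
        exact ih (pos + 1) count inStr false hsuf hlo' hcnt
      | false =>
        rw [if_neg (show ¬((false : Bool) = true) by simp),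
            if_neg (show ¬((false : Bool) = true) by simp)]
        by_cases h2 : c = '\\' ∧ inStr = true
        · rw [if_pos h2, if_pos h2]
          exact ih (pos + 1) count inStr true hsuf hlo' hcnt
        · rw [if_neg h2, if_neg h2]
          by_cases hq : c = '"'
          · rw [if_pos (show c = '"' ∧ (false : Bool) = false from ⟨hq, rfl⟩), if_pos hq]
            exact ih (pos + 1) count (!inStr) false hsuf hlo' hcnt
          · rw [if_neg (show ¬(c = '"' ∧ (false : Bool) = false) from fun hh => hq hh.1), if_neg hq]
            cases inStr with
            | true =>
              rw [if_neg (show ¬((true : Bool) = false) by simp),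
                  if_neg (show ¬((true : Bool) = false ∧ (c = '{' ∨ c = '[' ∨ c = '}' ∨ c = ']')) by simp)]
              exact ih (pos + 1) count true false hsuf hlo' hcnt
            | false =>
              rw [if_pos (show (false : Bool) = false from rfl)]
              by_cases hop : c = '{' ∨ c = '['
              · rw [if_pos hop,
                    if_pos (show (false : Bool) = false ∧ (c = '{' ∨ c = '[' ∨ c = '}' ∨ c = ']') from
                      ⟨rfl, by tauto⟩)]
                simp only [pvPass2, if_pos hop]
                rw [if_neg (show ¬(count + 1 = 0) by omega)]
                exact ih (pos + 1) (count + 1) false false hsuf hlo' (by omega)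
              · rw [if_neg hop]
                by_cases hcl : c = '}' ∨ c = ']'
                · rw [if_pos hcl,
                      if_pos (show (false : Bool) = false ∧ (c = '{' ∨ c = '[' ∨ c = '}' ∨ c = ']') from
                        ⟨rfl, by tauto⟩)]
                  simp only [pvPass2, if_neg hop]
                  by_cases hz : count - 1 = 0
                  · rw [if_pos hz, if_pos (show count + -1 = 0 by omega)]
                  · rw [if_neg hz, if_neg (show ¬(count + -1 = 0) by omega),
                        show count + -1 = count - 1 by ring]
                    exact ih (pos + 1) (count - 1) false false hsuf hlo' (by omega)
                · rw [if_neg hcl,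
                      if_neg (show ¬((false : Bool) = false ∧ (c = '{' ∨ c = '[' ∨ c = '}' ∨ c = ']')) from
                        fun hh => by tauto)]
                  exact ih (pos + 1) count false false hsuf hlo' hcnt
    · simp [pvLoopA, hp, pvPass1, pvPass2,
        PySem.List.pyRange_one_eq_nil (show (cs.length : Int) ≤ pos by omega)]

-- ===== VERDICT (by name: the statement is the Claim_ definition above) =====
theorem extract_complete_data_object_spec : Claim_equal_extract_complete_data_object := by
  unfold Claim_equal_extract_complete_data_object
  intro html start hdom hpre
  unfold Spec_extract_complete_data_object extract_complete_data_object extract_complete_data_object_alt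
  dsimp only
  have hpre' : -(html.toList.length : Int) ≤ start := hpre
  rw [← pvFindBrace_eq_find html.toList (((html.toList.length : Int) - start).toNat + 1) start
        (by have := Int.self_le_toNat ((html.toList.length : Int) - start); push_cast; omega) hpre']
  cases hf : pvFindBrace html.toList (((html.toList.length : Int) - start).toNat + 1) start with
  | none => rfl
  | some brace =>
    obtain ⟨hge, hb, c, hc, hop⟩ := pvFindBrace_spec html.toList _ start brace hf
    dsimp only
    have hbl : -(html.toList.length : Int) ≤ brace := by omega
    -- one step of A's loop at the opener
    have h0 : pvLoopA html.toList (((html.toList.length : Int) - brace).toNat + 1) brace 0 false false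
        = pvLoopA html.toList (((html.toList.length : Int) - brace).toNat) (brace + 1) 1 false false := by
      simp only [pvLoopA, if_pos hb]
      rw [hc]
      dsimp only
      rcases hop with rfl | rfl <;> norm_num <;> (intro h; exact absurd h (by decide))
    -- one step of B's passes at the opener
    have h1 : pvPass2 (pvPass1 html.toList
          (PySem.List.pyRange brace (html.toList.length : Int) 1) false false) 0
        = pvPass2 (pvPass1 html.toList
          (PySem.List.pyRange (brace + 1) (html.toList.length : Int) 1) false false) 1 := by
      rw [PySem.List.pyRange_one_cons hb]
      simp only [pvPass1, hc]
      have hq : ¬(c = '"') := by rcases hop with rfl | rfl <;> decide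
      have hbs : ¬(c = '\\' ∧ (false : Bool) = true) := by simp
      rw [if_neg (show ¬((false : Bool) = true) by simp), if_neg hbs, if_neg hq,
          if_pos (show True ∧ (c = '{' ∨ c = '[' ∨ c = '}' ∨ c = ']') from
            ⟨trivial, by tauto⟩)]
      simp only [pvPass2, if_pos hop]
      norm_num
    rw [h0, h1]
    have ht : ((html.toList.length : Int) - brace) ≤ (((html.toList.length : Int) - brace).toNat : Int) := Int.self_le_toNat _
    rw [pvLoop_eq_passes html.toList _ (brace + 1) 1 false false
      (by rw [Int.toNat_of_nonneg (by omega : (0:Int) ≤ (html.toList.length : Int) - brace)]; omega)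
      (by omega) (by omega)]
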